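-- pv_equiv track=rewrite | github.com/hhhhhanxy/new-wdsc | examples/review_rules_example.py | check
-- ===== SOURCE A (Python) =====
-- def check(text, rules):
--     """检查代码块格式"""
--     issues = []
--     lines = text.split('\n')
--
--     in_code_block = False
--     for i, line in enumerate(lines):
--         if line.strip().startswith('```'):
--             in_code_block = not in_code_block
--         elif in_code_block:
--             # 检查代码缩进
--             if line.startswith('\t'):
--                 issues.append(f'第{i+1}行：代码块中使用了制表符缩进，建议使用空格')
--
--     return issues
-- ===== SOURCE B (Python) =====
-- def check(text, rules):
--     """检查代码块格式"""
--     lines = text.split('\n')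
--     # split the lines into segments delimited by fence lines; segments at odd
--     # positions are code-block bodies (fence lines themselves belong to no segment)
--     segments = [[]]
--     for i, line in enumerate(lines):
--         if line.strip().startswith('```'):
--             segments.append([])
--         else:
--             segments[-1].append((i, line))
--     return [f'第{i+1}行：代码块中使用了制表符缩进，建议使用空格'
--             for k, seg in enumerate(segments) if k % 2 == 1
--             for i, line in seg if line.startswith('\t')]
-- ===== Notes on version B (the rewrite author's own statement) =====
-- stated objective: alternative
-- what changed: B replaces A's running in_code_block boolean toggle by splitting the lines into fence-delimited segments and flagging tab-indented lines only in the odd-indexed segments (code-block bodies).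
import Mathlib
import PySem

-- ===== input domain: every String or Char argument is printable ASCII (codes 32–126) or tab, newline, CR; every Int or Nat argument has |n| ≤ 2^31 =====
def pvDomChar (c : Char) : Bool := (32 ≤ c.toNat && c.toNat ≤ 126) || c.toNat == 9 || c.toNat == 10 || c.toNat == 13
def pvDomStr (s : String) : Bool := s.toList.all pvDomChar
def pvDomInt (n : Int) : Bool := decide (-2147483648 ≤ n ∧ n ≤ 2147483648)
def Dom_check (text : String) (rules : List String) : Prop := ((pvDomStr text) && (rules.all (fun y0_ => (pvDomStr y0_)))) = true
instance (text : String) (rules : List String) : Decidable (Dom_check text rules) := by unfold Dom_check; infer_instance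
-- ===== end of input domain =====

-- B replaces A's running in_code_block boolean toggle by splitting the lines into
-- fence-delimited segments and flagging tab-indented lines in the odd-indexed segments.

def pvFence (l : String) : Bool := PySem.Str.startswith (PySem.Str.strip l) "```"
def pvTab (l : String) : Bool := PySem.Str.startswith l "\t"
def pvMsg (i : Int) : String := "第" ++ PySem.Int.toStr (i + 1) ++ "行：代码块中使用了制表符缩进，建议使用空格"

-- ===== PORT A =====
def checkLoop : List (Int × String) → Bool → List String → List String
  | [], _, acc => acc
  | (i, line) :: rest, b, acc =>
    if pvFence line then checkLoop rest (!b) acc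
    else if b then
      (if pvTab line then checkLoop rest b (acc ++ [pvMsg i]) else checkLoop rest b acc)
    else checkLoop rest b acc

def check (text : String) (rules : List String) : List String :=
  checkLoop (PySem.List.enumerate ((PySem.Str.split? text "\n").getD []) 0) false []

-- ===== PORT B =====
-- segments = [[]]; a fence line appends a new empty segment, any other line goes to
-- the last segment; state is (finished segments, current last segment)
def segLoop : List (Int × String) → List (List (Int × String)) → List (Int × String) →
    List (List (Int × String))
  | [], done, cur => done ++ [cur]
  | p :: rest, done, cur =>
    if pvFence p.2 then segLoop rest (done ++ [cur]) []
    else segLoop rest done (cur ++ [p])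

def pvFlag (seg : List (Int × String)) : List String :=
  (seg.filter (fun q => pvTab q.2)).map (fun q => pvMsg q.1)

def check_alt (text : String) (rules : List String) : List String :=
  ((PySem.List.enumerate
      (segLoop (PySem.List.enumerate ((PySem.Str.split? text "\n").getD []) 0) [] []) 0).filter
    (fun p => PySem.Int.mod p.1 2 == 1)).flatMap (fun p => pvFlag p.2)

-- ===== PRECONDITION & SPEC =====
def Spec_check (text : String) (rules : List String) (out : List String) : Prop := out = check_alt text rules
instance (text : String) (rules : List String) (out : List String) : Decidable (Spec_check text rules out) := by unfold Spec_check; infer_instance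

-- ===== CLAIM (what is proved, stated in full; the proofs are below) =====
def Claim_equal_check : Prop := ∀ (text : String) (rules : List String), Dom_check text rules → Spec_check text rules (check text rules)

-- ===== LEMMAS AND PROOFS =====

-- recursive characterisation of the segment split: (first segment, remaining segments)
def segsP : List (Int × String) → List (Int × String) × List (List (Int × String))
  | [] => ([], [])
  | p :: rest =>
    let (s, S) := segsP rest
    if pvFence p.2 then ([], s :: S) else (p :: s, S)

-- flagged issues of the segments at odd positions (b = "current head position is odd")
def flagAlt : Bool → List (List (Int × String)) → List String
  | _, [] => []
  | true, x :: r => pvFlag x ++ flagAlt false r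
  | false, _ :: r => flagAlt true r

theorem checkLoop_acc (ps : List (Int × String)) (b : Bool) (acc : List String) :
    checkLoop ps b acc = acc ++ checkLoop ps b [] := by
  induction ps generalizing b acc with
  | nil => simp [checkLoop]
  | cons p rest ih =>
    obtain ⟨i, line⟩ := p
    simp only [checkLoop]
    split_ifs with hf hb ht
    · exact ih _ _
    · rw [ih _ (acc ++ [pvMsg i]), ih _ ([] ++ [pvMsg i])]
      simp
    · exact ih _ _
    · exact ih _ _

theorem segLoop_eq (ps : List (Int × String)) (done : List (List (Int × String)))
    (cur : List (Int × String)) :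
    segLoop ps done cur = done ++ ((cur ++ (segsP ps).1) :: (segsP ps).2) := by
  induction ps generalizing done cur with
  | nil => simp [segLoop, segsP]
  | cons p rest ih =>
    by_cases hf : pvFence p.2 <;> simp [segLoop, segsP, hf, ih]

theorem checkLoop_eq_flagAlt (ps : List (Int × String)) (b : Bool) :
    checkLoop ps b [] = flagAlt b ((segsP ps).1 :: (segsP ps).2) := by
  induction ps generalizing b with
  | nil => cases b <;> simp [checkLoop, segsP, flagAlt, pvFlag]
  | cons p rest ih =>
    obtain ⟨i, line⟩ := p
    by_cases hf : pvFence line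
    · cases b <;>
        simp only [checkLoop, hf, if_true, ih, segsP] <;>
        simp [flagAlt, pvFlag]
    · cases b
      · simpa [checkLoop, hf, segsP, flagAlt] using ih false
      · by_cases ht : pvTab line
        · rw [show checkLoop ((i, line) :: rest) true [] =
              checkLoop rest true [pvMsg i] by simp [checkLoop, hf, ht]]
          rw [checkLoop_acc, ih]
          simp [segsP, hf, flagAlt, pvFlag, ht]
        · rw [show checkLoop ((i, line) :: rest) true [] =
              checkLoop rest true [] by simp [checkLoop, hf, ht]]
          rw [ih]
          simp [segsP, hf, flagAlt, pvFlag, ht]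

theorem sel_eq_flagAlt (S : List (List (Int × String))) (n : Int) (hn : 0 ≤ n) :
    ((PySem.List.enumerate S n).filter (fun p => PySem.Int.mod p.1 2 == 1)).flatMap
      (fun p => pvFlag p.2) = flagAlt (PySem.Int.mod n 2 == 1) S := by
  induction S generalizing n with
  | nil => simp [PySem.List.enumerate_nil, flagAlt]
  | cons x r ih =>
    rw [PySem.List.enumerate_cons]
    have hm : PySem.Int.mod n 2 = n % 2 := PySem.Int.mod_eq_emod_of_pos (by omega)
    have hm1 : PySem.Int.mod (n + 1) 2 = (n + 1) % 2 := PySem.Int.mod_eq_emod_of_pos (by omega)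
    by_cases h : n % 2 = 1
    · have e1 : (PySem.Int.mod n 2 == 1) = true := by rw [hm, h]; rfl
      have e2 : (PySem.Int.mod (n + 1) 2 == 1) = false := by
        rw [hm1]; simp; omega
      simp only [List.filter_cons, e1, if_true, List.flatMap_cons]
      rw [ih (n + 1) (by omega), e2]
      simp [flagAlt]
    · have e1 : (PySem.Int.mod n 2 == 1) = false := by rw [hm]; simp; omega
      have e2 : (PySem.Int.mod (n + 1) 2 == 1) = true := by
        rw [hm1, show (n + 1) % 2 = 1 by omega]; rfl
      simp only [List.filter_cons, e1, Bool.false_eq_true, if_false]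
      rw [ih (n + 1) (by omega), e2]
      simp [flagAlt]

-- ===== VERDICT (by name: the statement is the Claim_ definition above) =====
theorem check_spec : Claim_equal_check := by
  intro text rules _
  unfold Spec_check check check_alt
  rw [segLoop_eq, checkLoop_eq_flagAlt, sel_eq_flagAlt _ 0 (by omega)]
  simp [flagAlt]
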